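-- pv_equiv track=rewrite | github.com/Jaddu1961/multimodal-financial-rag | app/retrieval/retriever.py | _ensure_type_diversity
-- ===== SOURCE A (Python) =====
-- def _ensure_type_diversity(
--     top_chunks:   list[dict],
--     all_chunks:   list[dict],
--     n_results:    int,
-- ) -> list[dict]:
--     """
--     Ensure we have diversity of chunk types.
--     If all top chunks are text, try to include
--     at least one table and one graph if available.
--
--     Args:
--         top_chunks: Already selected top chunks
--         all_chunks: All available chunks
--         n_results:  Target number of results
--
--     Returns:
--         Diversified chunk list
--     """
--     types_present = {
--         c["metadata"].get("chunk_type")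
--         for c in top_chunks
--     }
--
--     final = list(top_chunks)
--
--     # --- Try to add a table if none present ---
--     if "table" not in types_present and len(final) < n_results:
--         table_chunks = [
--             c for c in all_chunks
--             if c["metadata"].get("chunk_type") == "table"
--             and c not in final
--         ]
--         if table_chunks:
--             final.append(table_chunks[0])
--
--     # --- Try to add a graph if none present ---
--     if "graph" not in types_present and len(final) < n_results:
--         graph_chunks = [
--             c for c in all_chunks
--             if c["metadata"].get("chunk_type") == "graph"
--             and c not in final
--         ]
--         if graph_chunks:
--             final.append(graph_chunks[0])
--
--     return final[:n_results]
-- ===== SOURCE B (Python) =====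
-- def _ensure_type_diversity(
--     top_chunks:   list[dict],
--     all_chunks:   list[dict],
--     n_results:    int,
-- ) -> list[dict]:
--     # Recursive decomposition: compute the list of missing chunk types, then a
--     # generic recursive step appends one candidate (found with an early-exit
--     # next() scan) per missing type, subject to the capacity bound.
--     present = {c["metadata"].get("chunk_type") for c in top_chunks}
--     wanted = [t for t in ("table", "graph") if t not in present]
--
--     def add_missing(final, wanted):
--         if not wanted:
--             return final
--         t = wanted[0]
--         if len(final) < n_results:
--             cand = next((c for c in all_chunks
--                          if c["metadata"].get("chunk_type") == t
--                          and c not in final), None)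
--             if cand is not None:
--                 final = final + [cand]
--         return add_missing(final, wanted[1:])
--
--     return add_missing(list(top_chunks), wanted)[:n_results]
-- ===== Notes on version B (the rewrite author's own statement) =====
-- stated objective: alternative
-- what changed: Replaces A's two hard-coded staged branches (each with its own full list-comprehension filter of all_chunks) by a generic recursion over the computed list of missing chunk types, each step appending one candidate found by a single early-exit next() scan.
import Mathlib
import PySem

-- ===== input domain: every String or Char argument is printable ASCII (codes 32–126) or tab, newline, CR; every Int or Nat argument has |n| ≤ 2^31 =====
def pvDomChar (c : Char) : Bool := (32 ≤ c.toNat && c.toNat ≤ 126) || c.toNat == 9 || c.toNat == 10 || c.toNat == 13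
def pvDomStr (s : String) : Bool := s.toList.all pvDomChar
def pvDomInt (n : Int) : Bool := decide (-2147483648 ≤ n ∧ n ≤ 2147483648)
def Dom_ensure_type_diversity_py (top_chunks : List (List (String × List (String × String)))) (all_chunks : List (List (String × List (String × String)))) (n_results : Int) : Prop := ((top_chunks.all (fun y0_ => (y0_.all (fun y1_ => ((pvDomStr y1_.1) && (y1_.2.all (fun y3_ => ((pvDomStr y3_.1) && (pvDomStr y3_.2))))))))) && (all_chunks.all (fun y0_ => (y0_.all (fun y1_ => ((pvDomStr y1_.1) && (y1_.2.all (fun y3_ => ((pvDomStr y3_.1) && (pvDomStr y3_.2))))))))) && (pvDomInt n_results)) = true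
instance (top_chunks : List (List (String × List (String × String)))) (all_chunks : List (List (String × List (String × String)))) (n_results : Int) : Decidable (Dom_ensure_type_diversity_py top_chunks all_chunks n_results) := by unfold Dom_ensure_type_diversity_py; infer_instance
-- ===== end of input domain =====

-- B replaces A's two hard-coded staged branches by a generic recursion over the computed
-- list of missing chunk types (objective: alternative decomposition).

-- ===== PORT A =====
-- Shared modelling of Python semantics on the dict encoding (used by both ports):
-- d[k] / d.get(k) on the association-list encoding, via the PySem.Dict primitive
def pvGet? {ν : Type} (d : List (String × ν)) (k : String) : Option ν :=
  PySem.Dict.get? (PySem.Dict.mk d) k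

-- Python '==' on dict[str,str]: pointwise lookup agreement over the union of the keys
def pvInnerEq (a b : List (String × String)) : Bool :=
  (a.map Prod.fst ++ b.map Prod.fst).all (fun k => pvGet? a k == pvGet? b k)

-- '==' on the Optional[dict[str,str]] values of a chunk
def pvOptInnerEq : Option (List (String × String)) → Option (List (String × String)) → Bool
  | none, none => true
  | some a, some b => pvInnerEq a b
  | _, _ => false

-- Python '==' on a chunk (dict[str, dict[str,str]])
def pvChunkEq (c d : List (String × List (String × String))) : Bool :=
  (c.map Prod.fst ++ d.map Prod.fst).all (fun k => pvOptInnerEq (pvGet? c k) (pvGet? d k))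

-- Python 'c in xs' (list membership by ==)
def pvMem (c : List (String × List (String × String))) (xs : List (List (String × List (String × String)))) : Bool :=
  xs.any (fun d => pvChunkEq c d)

-- c["metadata"].get("chunk_type"); total via getD [] — exact under Pre_ ("metadata" present)
def pvChunkType (c : List (String × List (String × String))) : Option String :=
  pvGet? ((pvGet? c "metadata").getD []) "chunk_type"

def ensure_type_diversity_py (top_chunks : List (List (String × List (String × String)))) (all_chunks : List (List (String × List (String × String)))) (n_results : Int) : List (List (String × List (String × String))) :=
  -- types_present = {c["metadata"].get("chunk_type") for c in top_chunks}
  let types_present : PySem.Set (Option String) := PySem.Set.ofList (top_chunks.map pvChunkType)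
  -- final = list(top_chunks)
  let final0 := top_chunks
  -- table branch
  let final1 :=
    if PySem.Set.contains types_present (some "table") = false ∧ (final0.length : Int) < n_results then
      match all_chunks.filter (fun c => pvChunkType c == some "table" && !(pvMem c final0)) with
      | [] => final0
      | t :: _ => final0 ++ [t]
    else final0
  -- graph branch
  let final2 :=
    if PySem.Set.contains types_present (some "graph") = false ∧ (final1.length : Int) < n_results then
      match all_chunks.filter (fun c => pvChunkType c == some "graph" && !(pvMem c final1)) with
      | [] => final1
      | g :: _ => final1 ++ [g]
    else final1
  -- return final[:n_results]
  PySem.List.slice final2 none (some n_results)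

-- ===== PORT B =====
-- add_missing(final, wanted): one generic step per missing type; next(...) with early exit = List.find?
def pvAddMissing (all_chunks : List (List (String × List (String × String)))) (n_results : Int) :
    List (List (String × List (String × String))) → List String → List (List (String × List (String × String)))
  | final, [] => final
  | final, t :: rest =>
      let final' :=
        if (final.length : Int) < n_results then
          match all_chunks.find? (fun c => pvChunkType c == some t && !(pvMem c final)) with
          | some cand => final ++ [cand]
          | none => final
        else final
      pvAddMissing all_chunks n_results final' rest

def ensure_type_diversity_py_alt (top_chunks : List (List (String × List (String × String)))) (all_chunks : List (List (String × List (String × String)))) (n_results : Int) : List (List (String × List (String × String))) :=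
  let present : PySem.Set (Option String) := PySem.Set.ofList (top_chunks.map pvChunkType)
  let wanted := (["table", "graph"]).filter (fun t => !(PySem.Set.contains present (some t)))
  PySem.List.slice (pvAddMissing all_chunks n_results top_chunks wanted) none (some n_results)

-- ===== PRECONDITION & SPEC =====
-- Pre_ excludes exactly the inputs where Python A raises KeyError on a chunk lacking the "metadata"
-- key: always for such a chunk in top_chunks, and for such a chunk in all_chunks exactly when a
-- diversity scan happens (some type is missing from top_chunks and there is room, len(top) < n).
def Pre_ensure_type_diversity_py (top_chunks : List (List (String × List (String × String)))) (all_chunks : List (List (String × List (String × String)))) (n_results : Int) : Prop :=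
  (∀ c ∈ top_chunks, "metadata" ∈ c.map Prod.fst) ∧
  (((¬ (∃ c ∈ top_chunks, pvChunkType c = some "table") ∨ ¬ (∃ c ∈ top_chunks, pvChunkType c = some "graph")) ∧ (top_chunks.length : Int) < n_results) →
    ∀ c ∈ all_chunks, "metadata" ∈ c.map Prod.fst)
instance (top_chunks : List (List (String × List (String × String)))) (all_chunks : List (List (String × List (String × String)))) (n_results : Int) : Decidable (Pre_ensure_type_diversity_py top_chunks all_chunks n_results) := by unfold Pre_ensure_type_diversity_py; infer_instance

def pvWitness_ensure_type_diversity_py : (List (List (String × List (String × String)))) × (List (List (String × List (String × String)))) × Int :=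
  ([[("metadata", [("chunk_type", "text")])]], [[("metadata", [("chunk_type", "table")])]], 3)

def Spec_ensure_type_diversity_py (top_chunks : List (List (String × List (String × String)))) (all_chunks : List (List (String × List (String × String)))) (n_results : Int) (out : List (List (String × List (String × String)))) : Prop := out = ensure_type_diversity_py_alt top_chunks all_chunks n_results
instance (top_chunks : List (List (String × List (String × String)))) (all_chunks : List (List (String × List (String × String)))) (n_results : Int) (out : List (List (String × List (String × String)))) : Decidable (Spec_ensure_type_diversity_py top_chunks all_chunks n_results out) := by unfold Spec_ensure_type_diversity_py; infer_instance

-- ===== CLAIM (what is proved, stated in full; the proofs are below) =====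
def Claim_equal_ensure_type_diversity_py : Prop := ∀ (top_chunks : List (List (String × List (String × String)))) (all_chunks : List (List (String × List (String × String)))) (n_results : Int), Dom_ensure_type_diversity_py top_chunks all_chunks n_results → Pre_ensure_type_diversity_py top_chunks all_chunks n_results → Spec_ensure_type_diversity_py top_chunks all_chunks n_results (ensure_type_diversity_py top_chunks all_chunks n_results)

-- ===== LEMMAS AND PROOFS =====

-- early-exit find? computes the head of the eager filter
lemma pvFind?_eq_head?_filter {α : Type} (p : α → Bool) (l : List α) :
    l.find? p = (l.filter p).head? := by
  induction l with
  | nil => rfl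
  | cons a rest ih =>
    cases h : p a with
    | true => simp only [List.find?_cons, List.filter_cons, h]; rfl
    | false => simp only [List.find?_cons, List.filter_cons, h, ih]; rfl
-- A's match over the filter = B's step's match over find?
lemma pvStep_eq (all F : List (List (String × List (String × String)))) (t : String) :
    (match all.filter (fun c => pvChunkType c == some t && !(pvMem c F)) with
     | [] => F
     | c :: _ => F ++ [c])
    = (match all.find? (fun c => pvChunkType c == some t && !(pvMem c F)) with
       | some cand => F ++ [cand]
       | none => F) := by
  rw [pvFind?_eq_head?_filter]
  cases all.filter (fun c => pvChunkType c == some t && !(pvMem c F)) <;> rfl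

-- ===== VERDICT (by name: the statement is the Claim_ definition above) =====
theorem ensure_type_diversity_py_spec : Claim_equal_ensure_type_diversity_py := by
  intro top all n _ _
  unfold Spec_ensure_type_diversity_py ensure_type_diversity_py ensure_type_diversity_py_alt
  cases hb1 : PySem.Set.contains (PySem.Set.ofList (top.map pvChunkType)) (some "table") <;>
  cases hb2 : PySem.Set.contains (PySem.Set.ofList (top.map pvChunkType)) (some "graph") <;>
    simp only [hb1, hb2, Bool.not_true, Bool.not_false, List.filter_cons, List.filter_nil,
      reduceIte, pvAddMissing, pvStep_eq, reduceCtorEq, false_and, true_and,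
      if_false]
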